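-- pv_equiv track=rewrite | github.com/469-ragtag/rag-tag | src/rag_tag/parser/csv_to_graph.py | _neighbor_cell_keys
-- ===== SOURCE A (Python) =====
-- from itertools import product
--
-- def _neighbor_cell_keys(key: tuple[int, int, int], radius: int):
--     """Yield cell keys in the shell at Chebyshev radius `radius`."""
--     if radius == 0:
--         yield key
--         return
--     xr = range(key[0] - radius, key[0] + radius + 1)
--     yr = range(key[1] - radius, key[1] + radius + 1)
--     zr = range(key[2] - radius, key[2] + radius + 1)
--     for cx, cy, cz in product(xr, yr, zr):
--         if max(abs(cx - key[0]), abs(cy - key[1]), abs(cz - key[2])) == radius: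
--             yield (cx, cy, cz)
-- ===== SOURCE B (Python) =====
-- def _neighbor_cell_keys(key, radius):
--     """Yield cell keys in the shell at Chebyshev radius `radius`.
--
--     Enumerates the shell directly: for each (dx, dy) column of the cube,
--     emit the whole z-range on boundary columns and only the two face
--     cells z-radius / z+radius on interior columns (O(r^2) vs A's O(r^3)).
--     """
--     if radius == 0:
--         yield key
--         return
--     x, y, z = key
--     for dx in range(-radius, radius + 1):
--         edge_x = dx == -radius or dx == radius
--         for dy in range(-radius, radius + 1):
--             if edge_x or dy == -radius or dy == radius:
--                 for cz in range(z - radius, z + radius + 1):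
--                     yield (x + dx, y + dy, cz)
--             else:
--                 yield (x + dx, y + dy, z - radius)
--                 yield (x + dx, y + dy, z + radius)
-- ===== Notes on version B (the rewrite author's own statement) =====
-- stated objective: alternative
-- what changed: Instead of scanning the full (2r+1)^3 cube and filtering by Chebyshev distance, B enumerates the shell directly: boundary (dx,dy) columns emit the whole z-range and interior columns emit only the two cells z-radius and z+radius, touching O(r^2) cells instead of O(r^3).
import Mathlib
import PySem

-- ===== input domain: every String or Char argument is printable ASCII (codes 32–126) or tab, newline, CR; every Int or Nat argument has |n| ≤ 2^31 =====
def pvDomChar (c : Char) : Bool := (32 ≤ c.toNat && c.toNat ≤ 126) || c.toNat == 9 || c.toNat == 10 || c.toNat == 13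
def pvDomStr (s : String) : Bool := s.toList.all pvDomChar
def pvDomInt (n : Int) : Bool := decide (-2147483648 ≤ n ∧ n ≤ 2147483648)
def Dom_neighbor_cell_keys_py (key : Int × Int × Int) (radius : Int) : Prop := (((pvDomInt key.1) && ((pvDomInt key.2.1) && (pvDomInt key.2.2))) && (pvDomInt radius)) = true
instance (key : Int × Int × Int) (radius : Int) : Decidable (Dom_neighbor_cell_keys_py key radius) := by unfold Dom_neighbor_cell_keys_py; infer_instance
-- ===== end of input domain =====

-- B enumerates only the shell (interior (dx,dy) columns contribute just two z cells) instead of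
-- filtering the whole cube with a Chebyshev-distance test.

-- ===== PORT A =====
def neighbor_cell_keys_py (key : Int × Int × Int) (radius : Int) : List (Int × Int × Int) :=
  if radius = 0 then [key]
  else
    (PySem.List.pyRange (key.1 - radius) (key.1 + radius + 1) 1).flatMap fun cx =>
      (PySem.List.pyRange (key.2.1 - radius) (key.2.1 + radius + 1) 1).flatMap fun cy =>
        (PySem.List.pyRange (key.2.2 - radius) (key.2.2 + radius + 1) 1).flatMap fun cz =>
          if max |cx - key.1| (max |cy - key.2.1| |cz - key.2.2|) = radius then [(cx, cy, cz)] else []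

-- ===== PORT B =====
def neighbor_cell_keys_py_alt (key : Int × Int × Int) (radius : Int) : List (Int × Int × Int) :=
  if radius = 0 then [key]
  else
    (PySem.List.pyRange (-radius) (radius + 1) 1).flatMap fun dx =>
      let edge_x := dx = -radius ∨ dx = radius
      (PySem.List.pyRange (-radius) (radius + 1) 1).flatMap fun dy =>
        if edge_x ∨ dy = -radius ∨ dy = radius then
          (PySem.List.pyRange (key.2.2 - radius) (key.2.2 + radius + 1) 1).map fun cz =>
            (key.1 + dx, key.2.1 + dy, cz)
        else
          [(key.1 + dx, key.2.1 + dy, key.2.2 - radius), (key.1 + dx, key.2.1 + dy, key.2.2 + radius)]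

-- ===== PRECONDITION & SPEC =====
def Spec_neighbor_cell_keys_py (key : Int × Int × Int) (radius : Int) (out : List (Int × Int × Int)) : Prop := out = neighbor_cell_keys_py_alt key radius
instance (key : Int × Int × Int) (radius : Int) (out : List (Int × Int × Int)) : Decidable (Spec_neighbor_cell_keys_py key radius out) := by unfold Spec_neighbor_cell_keys_py; infer_instance

-- ===== CLAIM (what is proved, stated in full; the proofs are below) =====
def Claim_equal_neighbor_cell_keys_py : Prop := ∀ (key : Int × Int × Int) (radius : Int), Dom_neighbor_cell_keys_py key radius → Spec_neighbor_cell_keys_py key radius (neighbor_cell_keys_py key radius)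

-- ===== LEMMAS AND PROOFS =====

lemma flatMap_congr_mem {α β : Type} (l : List α) (f g : α → List β)
    (h : ∀ x ∈ l, f x = g x) : l.flatMap f = l.flatMap g := by
  induction l with
  | nil => rfl
  | cons a t ih =>
    simp only [List.flatMap_cons]
    rw [h a (by simp), ih (fun x hx => h x (by simp [hx]))]

lemma flatMap_eq_map_of_singleton {α β : Type} (l : List α) (f : α → List β) (g : α → β)
    (h : ∀ x ∈ l, f x = [g x]) : l.flatMap f = l.map g := by
  induction l with
  | nil => rfl
  | cons a t ih =>
    simp only [List.flatMap_cons, List.map_cons]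
    rw [h a (by simp), ih (fun x hx => h x (by simp [hx]))]
    rfl

lemma pyRange_shift (c a b : Int) :
    PySem.List.pyRange (c + a) (c + b) 1 = (PySem.List.pyRange a b 1).map (fun k => c + k) := by
  simp only [PySem.List.pyRange_one, List.map_map]
  rw [show c + b - (c + a) = b - a by ring]
  apply List.map_congr_left
  intro k _; simp; ring

/-- Per-(dx,dy) column: A's z-filter collapses to B's branch. -/
lemma inner_column {α : Type} (z r dx dy : Int) (f : Int → α) (hr : 0 < r)
    (hdx : |dx| ≤ r) (hdy : |dy| ≤ r) :
    (PySem.List.pyRange (z - r) (z + r + 1) 1).flatMap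
        (fun cz => if max |dx| (max |dy| |cz - z|) = r then [f cz] else [])
      = if (dx = -r ∨ dx = r) ∨ dy = -r ∨ dy = r then
          (PySem.List.pyRange (z - r) (z + r + 1) 1).map f
        else [f (z - r), f (z + r)] := by
  by_cases hedge : (dx = -r ∨ dx = r) ∨ dy = -r ∨ dy = r
  · rw [if_pos hedge]
    apply flatMap_eq_map_of_singleton
    intro cz hcz
    rw [PySem.List.mem_pyRange_one] at hcz
    rw [if_pos]
    simp only [Int.abs_eq_natAbs] at *
    omega
  · rw [if_neg hedge]
    push Not at hedge
    have h1 : z - r < z + r + 1 := by omega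
    rw [PySem.List.pyRange_one_cons h1,
        show z + r + 1 = (z + r) + 1 by ring,
        PySem.List.pyRange_one_succ_right (by omega : z - r + 1 ≤ z + r)]
    simp only [List.flatMap_cons, List.flatMap_append, List.flatMap_nil]
    have hmid : (PySem.List.pyRange (z - r + 1) (z + r) 1).flatMap
        (fun cz => if max |dx| (max |dy| |cz - z|) = r then [f cz] else []) = [] := by
      rw [List.flatMap_eq_nil_iff]
      intro cz hcz
      rw [PySem.List.mem_pyRange_one] at hcz
      rw [if_neg]
      simp only [Int.abs_eq_natAbs] at *
      omega
    rw [hmid]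
    rw [if_pos (by simp only [Int.abs_eq_natAbs] at *; omega),
        if_pos (by simp only [Int.abs_eq_natAbs] at *; omega)]
    simp

-- ===== VERDICT (by name: the statement is the Claim_ definition above) =====
theorem neighbor_cell_keys_py_spec : Claim_equal_neighbor_cell_keys_py := by
  intro key radius _
  obtain ⟨x, y, z⟩ := key
  unfold Spec_neighbor_cell_keys_py neighbor_cell_keys_py neighbor_cell_keys_py_alt
  by_cases h0 : radius = 0
  · simp [h0]
  rw [if_neg h0, if_neg h0]
  rcases lt_or_gt_of_ne h0 with hneg | hpos
  · -- negative radius: all ranges empty on both sides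
    rw [PySem.List.pyRange_one_eq_nil (by omega : (x : Int) + radius + 1 ≤ x - radius),
        PySem.List.pyRange_one_eq_nil (by omega : radius + 1 ≤ -radius)]
    rfl
  · -- positive radius
    dsimp only
    rw [show x - radius = x + (-radius) by ring, show x + radius + 1 = x + (radius + 1) by ring,
        pyRange_shift, List.flatMap_map]
    apply flatMap_congr_mem
    intro dx hdx
    rw [PySem.List.mem_pyRange_one] at hdx
    rw [show y - radius = y + (-radius) by ring, show y + radius + 1 = y + (radius + 1) by ring,
        pyRange_shift, List.flatMap_map]
    apply flatMap_congr_mem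
    intro dy hdy
    rw [PySem.List.mem_pyRange_one] at hdy
    simp only [add_sub_cancel_left]
    exact inner_column z radius dx dy (fun cz => (x + dx, y + dy, cz)) hpos
      (by rw [abs_le]; omega) (by rw [abs_le]; omega)
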